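-- pv_equiv track=rewrite | github.com/DenisDrobyshev/university | Algorithms/Graphs/TSP/method_branchAndbound.py | reverse_index
-- ===== SOURCE A (Python) =====
-- def reverse_index(l, i, j):
--     # Находим обрытный индекс для матрицы
--     def in_dict(d, v):
--         while v in d:
--             v = d[v]
--         return v
--
--     ln = len(l)
--     d1 = {l[k][0]: l[k][1] for k in range(0, ln, 1)}
--     d2 = {l[k][1]: l[k][0] for k in range(0, ln, 1)}
--     return [in_dict(d1, i), in_dict(d2, j)]
-- ===== SOURCE B (Python) =====
-- def reverse_index(l, i, j):
--     # Pointer jumping: square the whole mapping until fully resolved (every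
--     # value is terminal), then answer each query with a single lookup —
--     # a different algorithm from A's per-query chain walk, not claimed faster.
--     def resolved(d):
--         for _ in range(len(l)):
--             nd = {k: d.get(v, v) for k, v in d.items()}
--             if nd == d:
--                 break
--             d = nd
--         return d
--     d1 = resolved({p[0]: p[1] for p in l})
--     d2 = resolved({p[1]: p[0] for p in l})
--     return [d1.get(i, i), d2.get(j, j)]
-- ===== Notes on version B (the rewrite author's own statement) =====
-- stated objective: alternative
-- what changed: B replaces A's per-query chain walk (while v in d: v = d[v]) by pointer jumping: it repeatedly squares the whole mapping (each key's value advances one resolved step per round) until it reaches a fixpoint where every value is terminal, then answers each query with a single lookup.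
import Mathlib
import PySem

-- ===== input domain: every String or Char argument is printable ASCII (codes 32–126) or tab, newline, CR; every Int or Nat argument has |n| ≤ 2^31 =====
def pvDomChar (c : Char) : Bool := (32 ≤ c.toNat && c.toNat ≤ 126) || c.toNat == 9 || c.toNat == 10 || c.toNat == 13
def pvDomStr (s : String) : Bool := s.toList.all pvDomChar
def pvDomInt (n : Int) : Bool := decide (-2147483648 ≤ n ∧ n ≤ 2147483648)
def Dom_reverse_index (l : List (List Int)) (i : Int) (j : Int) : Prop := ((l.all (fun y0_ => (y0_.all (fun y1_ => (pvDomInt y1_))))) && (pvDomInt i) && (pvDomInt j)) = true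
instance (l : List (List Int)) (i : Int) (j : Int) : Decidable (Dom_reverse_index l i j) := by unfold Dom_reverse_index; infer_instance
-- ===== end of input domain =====

-- B replaces A's per-query chain walk by pointer jumping (repeatedly squaring the dict,
-- then one lookup per query); equivalence is about the return value.

-- ===== PORT A =====
-- while v in d: v = d[v]  — Python's loop diverges on cyclic chains; fuel l.length is exact
-- for every terminating chain (a terminating chain visits pairwise-distinct keys, and the
-- dict has at most l.length keys). Pre_ excludes the diverging inputs.
def pvInDict (fuel : Nat) (d : PySem.Dict Int Int) (v : Int) : Int :=
  match fuel with
  | 0 => v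
  | Nat.succ f => if d.contains v then pvInDict f d (d.getD v 0) else v

-- l[k][0] / l[k][1]: pyGetD with default (Python raises IndexError on short rows; Pre_ excludes those)
def reverse_index (l : List (List Int)) (i : Int) (j : Int) : List Int :=
  let ln : Int := PySem.List.len l
  let d1 := (PySem.List.pyRange 0 ln 1).foldl
    (fun d k => d.insert (PySem.List.pyGetD (PySem.List.pyGetD l k []) 0 0)
                         (PySem.List.pyGetD (PySem.List.pyGetD l k []) 1 0)) PySem.Dict.empty
  let d2 := (PySem.List.pyRange 0 ln 1).foldl
    (fun d k => d.insert (PySem.List.pyGetD (PySem.List.pyGetD l k []) 1 0)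
                         (PySem.List.pyGetD (PySem.List.pyGetD l k []) 0 0)) PySem.Dict.empty
  [pvInDict l.length d1 i, pvInDict l.length d2 j]

-- ===== PORT B =====
-- nd = {k: d.get(v, v) for k, v in d.items()}
def pvSquare (d : PySem.Dict Int Int) : PySem.Dict Int Int :=
  d.items.foldl (fun nd kv => nd.insert kv.1 (d.getD kv.2 kv.2)) PySem.Dict.empty

-- 'for _ in range(len(l)): … if nd == d: break'.  Python's 'nd == d' ignores key order,
-- but nd always has exactly d's keys in d's order, so Lean's ordered '=' is exact here.
def pvResolveLoop (fuel : Nat) (d : PySem.Dict Int Int) : PySem.Dict Int Int :=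
  match fuel with
  | 0 => d
  | Nat.succ f => let nd := pvSquare d; if nd = d then d else pvResolveLoop f nd

def reverse_index_alt (l : List (List Int)) (i : Int) (j : Int) : List Int :=
  let d1 := pvResolveLoop l.length
    (l.foldl (fun d p => d.insert (PySem.List.pyGetD p 0 0) (PySem.List.pyGetD p 1 0)) PySem.Dict.empty)
  let d2 := pvResolveLoop l.length
    (l.foldl (fun d p => d.insert (PySem.List.pyGetD p 1 0) (PySem.List.pyGetD p 0 0)) PySem.Dict.empty)
  [d1.getD i i, d2.getD j j]

-- ===== PRECONDITION & SPEC =====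
-- helpers for Pre_: one step of the chain (last matching pair, = dict last-write-wins), and key membership
def pvNext (l : List (List Int)) (src dst : Int) (v : Int) : Int :=
  match l.reverse.find? (fun p => PySem.List.pyGetD p src 0 == v) with
  | some p => PySem.List.pyGetD p dst 0
  | none => v

def pvHasKey (l : List (List Int)) (src : Int) (v : Int) : Bool :=
  l.any (fun p => PySem.List.pyGetD p src 0 == v)

-- Pre_ = exactly the inputs where Python A returns: every row has both entries (else IndexError),
-- and each chain leaves the key set within l.length steps (else the while-loop diverges).
def Pre_reverse_index (l : List (List Int)) (i : Int) (j : Int) : Prop :=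
  (∀ r ∈ l, 2 ≤ r.length) ∧
  (∃ n ≤ l.length, pvHasKey l 0 ((pvNext l 0 1)^[n] i) = false) ∧
  (∃ n ≤ l.length, pvHasKey l 1 ((pvNext l 1 0)^[n] j) = false)
instance (l : List (List Int)) (i : Int) (j : Int) : Decidable (Pre_reverse_index l i j) := by
  unfold Pre_reverse_index; infer_instance

def pvWitness_reverse_index : List (List Int) × Int × Int := ([[1, 2], [2, 3]], 1, 3)

def Spec_reverse_index (l : List (List Int)) (i : Int) (j : Int) (out : List Int) : Prop := out = reverse_index_alt l i j
instance (l : List (List Int)) (i : Int) (j : Int) (out : List Int) : Decidable (Spec_reverse_index l i j out) := by unfold Spec_reverse_index; infer_instance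

-- ===== CLAIM =====
def Claim_equal_reverse_index : Prop := ∀ (l : List (List Int)) (i : Int) (j : Int), Dom_reverse_index l i j → Pre_reverse_index l i j → Spec_reverse_index l i j (reverse_index l i j)

-- ===== LEMMAS AND PROOFS =====

-- the one-step function of a dict: advance if the value is a key, else stay
def pvG (d : PySem.Dict Int Int) (v : Int) : Int :=
  if d.contains v then d.getD v 0 else v

theorem pvG_fix (d : PySem.Dict Int Int) (v : Int) (h : d.contains v = false) : pvG d v = v := by
  simp [pvG, h]

theorem pvG_iterate_fix (d : PySem.Dict Int Int) (v : Int) (h : d.contains v = false) :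
    ∀ k, (pvG d)^[k] v = v := by
  intro k; induction k with
  | zero => rfl
  | succ k ih => rw [Function.iterate_succ_apply, pvG_fix d v h, ih]

-- A's chase is iteration of pvG
theorem pvInDict_eq_iterate (fuel : Nat) (d : PySem.Dict Int Int) (v : Int) :
    pvInDict fuel d v = (pvG d)^[fuel] v := by
  induction fuel generalizing v with
  | zero => rfl
  | succ f ih =>
    rw [Function.iterate_succ_apply]
    by_cases h : d.contains v
    · simp only [pvInDict, h, if_pos, pvG]; exact ih _
    · simp only [pvInDict, Bool.not_eq_true] at h ⊢
      rw [h]; simp only [Bool.false_eq_true, if_false]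
      rw [pvG_fix d v h, pvG_iterate_fix d v h]

-- once the chain escapes the keys, all later iterates agree
theorem pv_iterate_stable (d : PySem.Dict Int Int) (v : Int) (m p : Nat)
    (hmp : m ≤ p) (h : d.contains ((pvG d)^[m] v) = false) :
    (pvG d)^[p] v = (pvG d)^[m] v := by
  obtain ⟨k, rfl⟩ := Nat.exists_eq_add_of_le hmp
  rw [Nat.add_comm, Function.iterate_add_apply, pvG_iterate_fix d _ h]

-- lookup in a dict built by a fold of inserts = last matching element of the list
theorem pv_get?_foldl_insert {α : Type} (f g : α → Int) (l : List α) (x : Int)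
    (d : PySem.Dict Int Int) :
    (l.foldl (fun d r => d.insert (f r) (g r)) d).get? x =
      (match l.reverse.find? (fun r => f r == x) with
       | some r => some (g r)
       | none => d.get? x) := by
  induction l generalizing d with
  | nil => simp
  | cons a t ih =>
    simp only [List.foldl_cons, List.reverse_cons, List.find?_append]
    rw [ih]
    cases h : t.reverse.find? (fun r => f r == x) with
    | some r => simp
    | none =>
      by_cases hx : f a == x
      · have hxx : x = f a := (beq_iff_eq.mp hx).symm
        subst hxx
        simp [PySem.Dict.get?_insert_self]
      · have hne : x ≠ f a := fun he => by simp [he] at hx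
        simp [hx, PySem.Dict.get?_insert_of_ne _ _ hne]

-- the squared dict looks up to "one more step": get? x = (get? x).map (fun v => d.get(v, v))
theorem pv_get?_square (d : PySem.Dict Int Int) (hnd : d.keys.Nodup) (x : Int) :
    (pvSquare d).get? x = (d.get? x).map (fun v => d.getD v v) := by
  unfold pvSquare
  rw [pv_get?_foldl_insert (fun kv => kv.1) (fun kv => d.getD kv.2 kv.2) d.items x PySem.Dict.empty]
  cases hx : d.get? x with
  | none =>
    have hk : x ∉ d.keys := (PySem.Dict.get?_eq_none_iff_not_mem_keys d x).mp hx
    have : d.items.reverse.find? (fun kv => kv.1 == x) = none := by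
      rw [List.find?_eq_none]
      intro p hp hpx
      have h1 : p.1 = x := beq_iff_eq.mp hpx
      exact hk (h1 ▸ PySem.Dict.mem_keys_of_mem_items d (List.mem_reverse.mp hp))
    simp [this, PySem.Dict.get?_empty]
  | some v =>
    have hmem : (x, v) ∈ d.items := PySem.Dict.mem_items_of_get?_eq_some d hx
    have hsome : (d.items.reverse.find? (fun kv => kv.1 == x)).isSome := by
      rw [List.find?_isSome]
      exact ⟨(x, v), List.mem_reverse.mpr hmem, by simp⟩
    obtain ⟨p, hp⟩ := Option.isSome_iff_exists.mp hsome
    have hpmem : p ∈ d.items := List.mem_reverse.mp (List.mem_of_find?_eq_some hp)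
    have hps := List.find?_some hp
    have hpx : p.1 = x := by simpa using hps
    have hpv : p.2 = v := by
      have := PySem.Dict.get?_of_mem_items d (k := p.1) (v := p.2) (by simpa using hpmem) hnd
      rw [hpx, hx] at this
      exact (Option.some.injEq _ _).mp this.symm
    simp [hp, hpv]

theorem pv_contains_square (d : PySem.Dict Int Int) (hnd : d.keys.Nodup) (x : Int) :
    (pvSquare d).contains x = d.contains x := by
  rw [PySem.Dict.contains_eq_isSome_get?, PySem.Dict.contains_eq_isSome_get?, pv_get?_square d hnd]
  cases d.get? x <;> simp

theorem pv_nodup_square (d : PySem.Dict Int Int) : (pvSquare d).keys.Nodup := by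
  unfold pvSquare
  exact PySem.Dict.nodup_keys_foldl_insert_key d.items (fun kv => kv.1)
    (fun nd kv => d.getD kv.2 kv.2) PySem.Dict.empty (by simp [PySem.Dict.keys_empty])

-- d.get(v, v) as one pvG step
theorem pv_getD_self_eq_G (d : PySem.Dict Int Int) (v : Int) : d.getD v v = pvG d v := by
  unfold pvG
  by_cases h : d.contains v
  · rw [if_pos h, PySem.Dict.getD_eq_get?_getD, PySem.Dict.getD_eq_get?_getD]
    rw [PySem.Dict.contains_eq_isSome_get?] at h
    obtain ⟨u, hu⟩ := Option.isSome_iff_exists.mp h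
    simp [hu]
  · simp only [h, Bool.false_eq_true, if_false]
    exact PySem.Dict.getD_of_not_contains d v (by simpa using h)

-- squaring the dict squares the step function
theorem pvG_square (d : PySem.Dict Int Int) (hnd : d.keys.Nodup) :
    pvG (pvSquare d) = pvG d ∘ pvG d := by
  funext v
  simp only [Function.comp_apply]
  by_cases h : d.contains v
  · have hc : (pvSquare d).contains v = true := by rw [pv_contains_square d hnd]; exact h
    rw [PySem.Dict.contains_eq_isSome_get?] at h
    obtain ⟨w, hw⟩ := Option.isSome_iff_exists.mp h
    have hG : pvG d v = w := by
      unfold pvG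
      rw [if_pos (by rw [PySem.Dict.contains_eq_isSome_get?, hw]; rfl)]
      simp [PySem.Dict.getD_eq_get?_getD, hw]
    rw [hG]
    have hL : pvG (pvSquare d) v = d.getD w w := by
      unfold pvG
      rw [if_pos hc, PySem.Dict.getD_eq_get?_getD, pv_get?_square d hnd, hw]
      rfl
    rw [hL, pv_getD_self_eq_G]
  · have hc : (pvSquare d).contains v = false := by
      rw [pv_contains_square d hnd]; simpa using h
    rw [pvG_fix _ _ hc, pvG_fix d v (by simpa using h), pvG_fix d v (by simpa using h)]

-- at a fixpoint of squaring, further iteration does nothing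
theorem pvG_idem_iterate (f : Int → Int) (hf : f ∘ f = f) :
    ∀ k, f^[k + 1] = f := by
  intro k; induction k with
  | zero => simp
  | succ k ih => rw [Function.iterate_succ', ih, hf]

-- the resolution loop computes 2^fuel steps of the original dict
theorem pv_resolve_loop (fuel : Nat) (d : PySem.Dict Int Int) (hnd : d.keys.Nodup) :
    pvG (pvResolveLoop fuel d) = (pvG d)^[2 ^ fuel] := by
  induction fuel generalizing d with
  | zero => simp [pvResolveLoop]
  | succ f ih =>
    unfold pvResolveLoop
    by_cases h : pvSquare d = d
    · simp only [h, if_pos]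
      have hsq : pvG d ∘ pvG d = pvG d := by
        rw [← pvG_square d hnd, h]
      obtain ⟨k, hk⟩ : ∃ k, 2 ^ (f + 1) = k + 1 :=
        ⟨2 ^ (f + 1) - 1, by have := Nat.one_le_two_pow (n := f + 1); omega⟩
      rw [hk, pvG_idem_iterate _ hsq]
    · simp only [h, if_false]
      rw [ih (pvSquare d) (pv_nodup_square d), pvG_square d hnd,
        show pvG d ∘ pvG d = (pvG d)^[2] from rfl,
        pow_succ, Nat.mul_comm, Function.iterate_mul]

-- final lookup of B = one pvG step of the resolved dict
theorem pv_B_lookup (fuel : Nat) (d : PySem.Dict Int Int) (hnd : d.keys.Nodup) (v : Int) :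
    (pvResolveLoop fuel d).getD v v = (pvG d)^[2 ^ fuel] v := by
  rw [pv_getD_self_eq_G, pv_resolve_loop fuel d hnd]

-- the step/membership of the foldl-built dict match the Pre_ helpers pvNext / pvHasKey
theorem pv_contains_build (l : List (List Int)) (src dst : Int) (v : Int) :
    (l.foldl (fun d p => d.insert (PySem.List.pyGetD p src 0) (PySem.List.pyGetD p dst 0))
      PySem.Dict.empty).contains v = pvHasKey l src v := by
  rw [PySem.Dict.contains_eq_isSome_get?,
    pv_get?_foldl_insert (fun p => PySem.List.pyGetD p src 0) (fun p => PySem.List.pyGetD p dst 0) l v PySem.Dict.empty]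
  unfold pvHasKey
  cases h : l.reverse.find? (fun p => PySem.List.pyGetD p src 0 == v) with
  | some p =>
    have hp := List.find?_some h
    have hm := List.mem_reverse.mp (List.mem_of_find?_eq_some h)
    simp only [Option.isSome_some]
    exact (List.any_eq_true.mpr ⟨p, hm, hp⟩).symm
  | none =>
    simp only [PySem.Dict.get?_empty, Option.isSome_none]
    rw [eq_comm, Bool.eq_false_iff, Ne, List.any_eq_true]
    rintro ⟨p, hm, hp⟩
    rw [List.find?_eq_none] at h
    exact absurd hp (by simpa using h p (List.mem_reverse.mpr hm))

theorem pv_G_build (l : List (List Int)) (src dst : Int) :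
    pvG (l.foldl (fun d p => d.insert (PySem.List.pyGetD p src 0) (PySem.List.pyGetD p dst 0))
      PySem.Dict.empty) = pvNext l src dst := by
  funext v
  unfold pvG pvNext
  rw [pv_contains_build l src dst v]
  by_cases h : pvHasKey l src v
  · rw [if_pos h]
    rw [PySem.Dict.getD_eq_get?_getD,
      pv_get?_foldl_insert (fun p => PySem.List.pyGetD p src 0) (fun p => PySem.List.pyGetD p dst 0) l v PySem.Dict.empty]
    unfold pvHasKey at h
    obtain ⟨p, hm, hp⟩ := List.any_eq_true.mp h
    have : (l.reverse.find? (fun p => PySem.List.pyGetD p src 0 == v)).isSome := by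
      rw [List.find?_isSome]; exact ⟨p, List.mem_reverse.mpr hm, hp⟩
    obtain ⟨q, hq⟩ := Option.isSome_iff_exists.mp this
    simp [hq]
  · rw [if_neg h]
    unfold pvHasKey at h
    have : l.reverse.find? (fun p => PySem.List.pyGetD p src 0 == v) = none := by
      rw [List.find?_eq_none]
      intro p hm hp
      exact h (List.any_eq_true.mpr ⟨p, List.mem_reverse.mp hm, hp⟩)
    simp [this]

theorem pv_nodup_build (l : List (List Int)) (src dst : Int) :
    (l.foldl (fun d p => d.insert (PySem.List.pyGetD p src 0) (PySem.List.pyGetD p dst 0))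
      PySem.Dict.empty).keys.Nodup :=
  PySem.Dict.nodup_keys_foldl_insert_key l (fun p => PySem.List.pyGetD p src 0) _
    PySem.Dict.empty (by simp [PySem.Dict.keys_empty])

-- one side: A's chase over the built dict = B's resolved lookup, given the chain escapes in ≤ l.length steps
theorem pv_side (l : List (List Int)) (src dst : Int) (v : Int)
    (hesc : ∃ n ≤ l.length, pvHasKey l src ((pvNext l src dst)^[n] v) = false) :
    pvInDict l.length
      (l.foldl (fun d p => d.insert (PySem.List.pyGetD p src 0) (PySem.List.pyGetD p dst 0))
        PySem.Dict.empty) v =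
    (pvResolveLoop l.length
      (l.foldl (fun d p => d.insert (PySem.List.pyGetD p src 0) (PySem.List.pyGetD p dst 0))
        PySem.Dict.empty)).getD v v := by
  set D := l.foldl (fun d p => d.insert (PySem.List.pyGetD p src 0) (PySem.List.pyGetD p dst 0))
    PySem.Dict.empty with hD
  obtain ⟨m, hm, hkey⟩ := hesc
  have hkeyD : D.contains ((pvG D)^[m] v) = false := by
    rw [pv_contains_build l src dst, pv_G_build l src dst]; exact hkey
  rw [pvInDict_eq_iterate, pv_B_lookup l.length D (pv_nodup_build l src dst) v,
    pv_iterate_stable D v m l.length hm hkeyD,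
    pv_iterate_stable D v m (2 ^ l.length) (le_trans hm (Nat.le_of_lt (Nat.lt_two_pow_self))) hkeyD]

-- A's range-indexed dict build = the direct foldl over l
theorem pv_build_eq (l : List (List Int)) (a b : Int) :
    (PySem.List.pyRange 0 (PySem.List.len l) 1).foldl
      (fun d k => d.insert (PySem.List.pyGetD (PySem.List.pyGetD l k []) a 0)
                           (PySem.List.pyGetD (PySem.List.pyGetD l k []) b 0)) PySem.Dict.empty =
    l.foldl (fun d p => d.insert (PySem.List.pyGetD p a 0) (PySem.List.pyGetD p b 0))
      PySem.Dict.empty := by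
  exact PySem.List.foldl_pyRange_zero_pyGetD l ([] : List Int)
    (fun d p => d.insert (PySem.List.pyGetD p a 0) (PySem.List.pyGetD p b 0)) PySem.Dict.empty

-- ===== VERDICT =====
theorem reverse_index_spec : Claim_equal_reverse_index := by
  intro l i j _ hpre
  obtain ⟨_, h1, h2⟩ := hpre
  show reverse_index l i j = reverse_index_alt l i j
  simp only [reverse_index, reverse_index_alt]
  rw [pv_build_eq l 0 1, pv_build_eq l 1 0, pv_side l 0 1 i h1, pv_side l 1 0 j h2]
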